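-- pv_equiv track=rewrite | github.com/formoree/epibole | 2_(8.07)CCPS109/test6.py | bridge_hand_shorthand
-- ===== SOURCE A (Python) =====
-- def bridge_hand_shorthand(hand):
--     shorthand = ''
--
--     spades = [card[0] for card in hand if card[1] == 'spades']
--     hearts = [card[0] for card in hand if card[1] == 'hearts']
--     diamonds = [card[0] for card in hand if card[1] == 'diamonds']
--     clubs = [card[0] for card in hand if card[1] == 'clubs']
--
--     shorthand = ''
--
--     for suit in (spades, hearts, diamonds, clubs):
--         shorthand_piece = ''
--         while True:
--             if 'ace' in suit:
--                 shorthand_piece += 'A'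
--                 suit.remove('ace')
--                 continue
--
--             if 'king' in suit:
--                 shorthand_piece += 'K'
--                 suit.remove('king')
--                 continue
--
--             if 'queen' in suit:
--                 shorthand_piece += 'Q'
--                 suit.remove('queen')
--                 continue
--
--             if 'jack' in suit:
--                 shorthand_piece += 'J'
--                 suit.remove('jack')
--                 continue
--
--             shorthand_piece += ''.join(['x' for x in suit])
--             break
--
--         if not shorthand_piece:
--             shorthand_piece = '-'
--
--         shorthand += shorthand_piece + ' '
--
--     return shorthand.strip()
-- ===== SOURCE B (Python) =====
-- def bridge_hand_shorthand(hand):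
--     pieces = []
--     for suit in ('spades', 'hearts', 'diamonds', 'clubs'):
--         ranks = [rank for rank, s in hand if s == suit]
--         piece = ''
--         for rank, sym in (('ace', 'A'), ('king', 'K'), ('queen', 'Q'), ('jack', 'J')):
--             piece += sym * ranks.count(rank)
--         piece += 'x' * sum(1 for r in ranks if r not in ('ace', 'king', 'queen', 'jack'))
--         pieces.append(piece or '-')
--     return ' '.join(pieces)
-- ===== Notes on version B (the rewrite author's own statement) =====
-- stated objective: simpler
-- what changed: Replaces A's mutating while-loop that repeatedly rescans each suit for the highest honor and removes it one card at a time with a single counting pass per suit: each honor symbol is repeated count(rank) times and 'x' repeated by the number of non-honor cards, then the four pieces are ' '.join-ed instead of appended-with-trailing-space and stripped.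
import Mathlib
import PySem

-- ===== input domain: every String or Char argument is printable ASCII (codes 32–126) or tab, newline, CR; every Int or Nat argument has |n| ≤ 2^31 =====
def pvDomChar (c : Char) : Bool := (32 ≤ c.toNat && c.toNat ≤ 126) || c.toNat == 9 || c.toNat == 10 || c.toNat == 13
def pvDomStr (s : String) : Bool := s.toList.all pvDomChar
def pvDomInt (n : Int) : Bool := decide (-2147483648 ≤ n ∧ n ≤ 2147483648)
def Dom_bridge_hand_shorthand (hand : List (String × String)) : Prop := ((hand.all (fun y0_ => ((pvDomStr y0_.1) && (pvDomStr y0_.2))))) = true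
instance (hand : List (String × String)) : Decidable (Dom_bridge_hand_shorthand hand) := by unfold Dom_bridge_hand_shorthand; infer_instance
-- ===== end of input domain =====

-- B replaces A's repeated scan-and-remove while-loop by per-honor counting and string
-- repetition per suit (objective: simpler; same asymptotic cost).

-- ===== PORT A =====
-- A's `while True` loop over one suit: repeatedly emit and remove the highest honor,
-- else emit 'x' per remaining card and stop.  `suit.remove(r)` on a present r is
-- erasing the first occurrence, hence List.erase.
def pvLoopA (suit : List String) (piece : List Char) : List Char :=
  if h1 : suit.contains "ace" then
    pvLoopA (suit.erase "ace") (piece ++ ['A'])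
  else if h2 : suit.contains "king" then
    pvLoopA (suit.erase "king") (piece ++ ['K'])
  else if h3 : suit.contains "queen" then
    pvLoopA (suit.erase "queen") (piece ++ ['Q'])
  else if h4 : suit.contains "jack" then
    pvLoopA (suit.erase "jack") (piece ++ ['J'])
  else
    piece ++ PySem.Chars.join [] (suit.map (fun _ => ['x']))
termination_by suit.length
decreasing_by
  · have hm : "ace" ∈ suit := by simpa using h1
    have := List.length_erase_of_mem hm
    have := List.length_pos_of_mem hm
    omega
  · have hm : "king" ∈ suit := by simpa using h2
    have := List.length_erase_of_mem hm
    have := List.length_pos_of_mem hm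
    omega
  · have hm : "queen" ∈ suit := by simpa using h3
    have := List.length_erase_of_mem hm
    have := List.length_pos_of_mem hm
    omega
  · have hm : "jack" ∈ suit := by simpa using h4
    have := List.length_erase_of_mem hm
    have := List.length_pos_of_mem hm
    omega

def bridge_hand_shorthand (hand : List (String × String)) : String :=
  let spades := (hand.filter (fun card => card.2 == "spades")).map (fun card => card.1)
  let hearts := (hand.filter (fun card => card.2 == "hearts")).map (fun card => card.1)
  let diamonds := (hand.filter (fun card => card.2 == "diamonds")).map (fun card => card.1)
  let clubs := (hand.filter (fun card => card.2 == "clubs")).map (fun card => card.1)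
  let shorthand : List Char :=
    [spades, hearts, diamonds, clubs].foldl
      (fun sh suit =>
        let piece := pvLoopA suit []
        let piece := if piece = [] then ['-'] else piece
        sh ++ (piece ++ [' '])) []
  String.ofList (PySem.Chars.strip shorthand)

-- ===== PORT B =====
-- Source B: per suit, concatenate sym * ranks.count(rank) for the four honors, then
-- 'x' * (number of non-honor ranks); '-' for an empty piece; ' '.join the pieces.
def pvPieceB (ranks : List String) : List Char :=
  let p : List Char :=
    [("ace", 'A'), ("king", 'K'), ("queen", 'Q'), ("jack", 'J')].foldl
      (fun acc hs => acc ++ List.replicate (ranks.count hs.1) hs.2) []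
  let p := p ++ List.replicate
      (ranks.countP (fun r => !(r == "ace" || r == "king" || r == "queen" || r == "jack"))) 'x'
  if p = [] then ['-'] else p

def bridge_hand_shorthand_alt (hand : List (String × String)) : String :=
  let pieces := ["spades", "hearts", "diamonds", "clubs"].map
    (fun s => pvPieceB ((hand.filter (fun card => card.2 == s)).map (fun card => card.1)))
  String.ofList (PySem.Chars.join [' '] pieces)

-- ===== PRECONDITION & SPEC =====
def Spec_bridge_hand_shorthand (hand : List (String × String)) (out : String) : Prop := out = bridge_hand_shorthand_alt hand
instance (hand : List (String × String)) (out : String) : Decidable (Spec_bridge_hand_shorthand hand out) := by unfold Spec_bridge_hand_shorthand; infer_instance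

-- ===== CLAIM (what is proved, stated in full; the proofs are below) =====
def Claim_equal_bridge_hand_shorthand : Prop := ∀ (hand : List (String × String)), Dom_bridge_hand_shorthand hand → Spec_bridge_hand_shorthand hand (bridge_hand_shorthand hand)

-- ===== LEMMAS AND PROOFS =====

-- the canonical content of one suit's piece (before the '-' substitution)
def pvBody (suit : List String) : List Char :=
  List.replicate (suit.count "ace") 'A' ++ List.replicate (suit.count "king") 'K' ++
  List.replicate (suit.count "queen") 'Q' ++ List.replicate (suit.count "jack") 'J' ++
  List.replicate
    (suit.countP (fun r => !(r == "ace" || r == "king" || r == "queen" || r == "jack"))) 'x'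

theorem countP_erase_not {α : Type} [DecidableEq α] (p : α → Bool) (a : α) :
    ∀ l : List α, p a = false → (l.erase a).countP p = l.countP p := by
  intro l hp
  induction l with
  | nil => rfl
  | cons x xs ih =>
    by_cases hx : x = a
    · subst hx; simp [List.erase_cons_head, hp]
    · simp [hx, List.countP_cons, ih]

theorem replicate_pred_cons {β : Type} (b : β) (n : Nat) (hn : 0 < n) :
    b :: List.replicate (n - 1) b = List.replicate n b := by
  cases n with
  | zero => omega
  | succ m => simp [List.replicate_succ]

theorem pvLoopA_eq : ∀ (n : Nat) (suit : List String) (piece : List Char),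
    suit.length ≤ n → pvLoopA suit piece = piece ++ pvBody suit := by
  intro n
  induction n with
  | zero =>
    intro suit piece h
    have : suit = [] := List.eq_nil_of_length_eq_zero (Nat.le_zero.mp h)
    subst this
    rw [pvLoopA]
    simp [pvBody, PySem.Chars.join, List.intercalate]
  | succ m ih =>
    intro suit piece h
    rw [pvLoopA]
    split_ifs with h1 h2 h3 h4
    · have hm : "ace" ∈ suit := by simpa using h1
      have hl := List.length_erase_of_mem hm
      have hp := List.length_pos_of_mem hm
      rw [ih _ _ (by omega)]
      have hc : 0 < suit.count "ace" := List.count_pos_iff.mpr hm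
      simp only [pvBody, List.count_erase_self, List.count_erase_of_ne (by decide : "king" ≠ "ace"),
        List.count_erase_of_ne (by decide : "queen" ≠ "ace"),
        List.count_erase_of_ne (by decide : "jack" ≠ "ace"),
        countP_erase_not (fun r : String => !(r == "ace" || r == "king" || r == "queen" || r == "jack")) "ace" suit (by decide)]
      rw [List.append_assoc]
      congr 1
      rw [← replicate_pred_cons 'A' (suit.count "ace") hc]
      simp [List.append_assoc]
    · have hm : "king" ∈ suit := by simpa using h2
      have hl := List.length_erase_of_mem hm
      have hp := List.length_pos_of_mem hm
      rw [ih _ _ (by omega)]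
      have hc : 0 < suit.count "king" := List.count_pos_iff.mpr hm
      have ha : suit.count "ace" = 0 := by
        rw [List.count_eq_zero]; simpa using h1
      simp only [pvBody, List.count_erase_self, List.count_erase_of_ne (by decide : "ace" ≠ "king"),
        List.count_erase_of_ne (by decide : "queen" ≠ "king"),
        List.count_erase_of_ne (by decide : "jack" ≠ "king"),
        countP_erase_not (fun r : String => !(r == "ace" || r == "king" || r == "queen" || r == "jack")) "king" suit (by decide), ha, List.replicate_zero, List.nil_append]
      rw [List.append_assoc]
      congr 1
      rw [← replicate_pred_cons 'K' (suit.count "king") hc]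
      simp [List.append_assoc]
    · have hm : "queen" ∈ suit := by simpa using h3
      have hl := List.length_erase_of_mem hm
      have hp := List.length_pos_of_mem hm
      rw [ih _ _ (by omega)]
      have hc : 0 < suit.count "queen" := List.count_pos_iff.mpr hm
      have ha : suit.count "ace" = 0 := by rw [List.count_eq_zero]; simpa using h1
      have hk : suit.count "king" = 0 := by rw [List.count_eq_zero]; simpa using h2
      simp only [pvBody, List.count_erase_self, List.count_erase_of_ne (by decide : "ace" ≠ "queen"),
        List.count_erase_of_ne (by decide : "king" ≠ "queen"),
        List.count_erase_of_ne (by decide : "jack" ≠ "queen"),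
        countP_erase_not (fun r : String => !(r == "ace" || r == "king" || r == "queen" || r == "jack")) "queen" suit (by decide), ha, hk, List.replicate_zero, List.nil_append]
      rw [List.append_assoc]
      congr 1
      rw [← replicate_pred_cons 'Q' (suit.count "queen") hc]
      simp [List.append_assoc]
    · have hm : "jack" ∈ suit := by simpa using h4
      have hl := List.length_erase_of_mem hm
      have hp := List.length_pos_of_mem hm
      rw [ih _ _ (by omega)]
      have hc : 0 < suit.count "jack" := List.count_pos_iff.mpr hm
      have ha : suit.count "ace" = 0 := by rw [List.count_eq_zero]; simpa using h1
      have hk : suit.count "king" = 0 := by rw [List.count_eq_zero]; simpa using h2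
      have hq : suit.count "queen" = 0 := by rw [List.count_eq_zero]; simpa using h3
      simp only [pvBody, List.count_erase_self, List.count_erase_of_ne (by decide : "ace" ≠ "jack"),
        List.count_erase_of_ne (by decide : "king" ≠ "jack"),
        List.count_erase_of_ne (by decide : "queen" ≠ "jack"),
        countP_erase_not (fun r : String => !(r == "ace" || r == "king" || r == "queen" || r == "jack")) "jack" suit (by decide), ha, hk, hq, List.replicate_zero, List.nil_append]
      rw [List.append_assoc]
      congr 1
      rw [← replicate_pred_cons 'J' (suit.count "jack") hc]
      simp
    · have ha : suit.count "ace" = 0 := by rw [List.count_eq_zero]; simpa using h1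
      have hk : suit.count "king" = 0 := by rw [List.count_eq_zero]; simpa using h2
      have hq : suit.count "queen" = 0 := by rw [List.count_eq_zero]; simpa using h3
      have hj : suit.count "jack" = 0 := by rw [List.count_eq_zero]; simpa using h4
      have hall : suit.countP
          (fun r => !(r == "ace" || r == "king" || r == "queen" || r == "jack")) = suit.length := by
        apply List.countP_eq_length.mpr
        intro a hmem
        have m1 : "ace" ∉ suit := by simpa using h1
        have m2 : "king" ∉ suit := by simpa using h2
        have m3 : "queen" ∉ suit := by simpa using h3
        have m4 : "jack" ∉ suit := by simpa using h4
        have e1 : a ≠ "ace" := fun e => m1 (e ▸ hmem)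
        have e2 : a ≠ "king" := fun e => m2 (e ▸ hmem)
        have e3 : a ≠ "queen" := fun e => m3 (e ▸ hmem)
        have e4 : a ≠ "jack" := fun e => m4 (e ▸ hmem)
        simp [e1, e2, e3, e4]
      have hjoin : PySem.Chars.join [] (suit.map (fun _ => ['x'])) =
          List.replicate suit.length 'x' := by
        have h1' : suit.map (fun _ => (['x'] : List Char)) =
            (suit.map (fun _ => 'x')).map (fun c => [c]) := by
          rw [List.map_map]; rfl
        rw [h1', PySem.Chars.join_nil_singletons, List.map_const']
      rw [hjoin]
      simp only [pvBody, ha, hk, hq, hj, hall, List.replicate_zero, List.nil_append]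

theorem pvPieceB_eq (ranks : List String) :
    pvPieceB ranks = if pvBody ranks = [] then ['-'] else pvBody ranks := by
  simp [pvPieceB, pvBody, List.foldl, List.append_assoc]

theorem pvPiece_eq (ranks : List String) :
    (if pvLoopA ranks [] = [] then ['-'] else pvLoopA ranks []) = pvPieceB ranks := by
  rw [pvLoopA_eq ranks.length ranks [] (Nat.le_refl _), List.nil_append, pvPieceB_eq]

theorem pvPieceB_nonspace (ranks : List String) :
    ∀ c ∈ pvPieceB ranks, PySem.Chars.isspace c = false := by
  intro c hc
  rw [pvPieceB_eq] at hc
  split_ifs at hc with h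
  · simp at hc; subst hc; decide
  · simp only [pvBody, List.mem_append, List.mem_replicate] at hc
    rcases hc with ((((⟨-, rfl⟩ | ⟨-, rfl⟩) | ⟨-, rfl⟩) | ⟨-, rfl⟩) | ⟨-, rfl⟩) <;> decide

theorem pvPieceB_ne_nil (ranks : List String) : pvPieceB ranks ≠ [] := by
  rw [pvPieceB_eq]
  split_ifs with h
  · simp
  · exact h

theorem pvStrip_pieces (p1 p2 p3 p4 : List Char)
    (h1 : p1 ≠ []) (h4 : p4 ≠ [])
    (n1 : ∀ c ∈ p1, PySem.Chars.isspace c = false)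
    (n4 : ∀ c ∈ p4, PySem.Chars.isspace c = false) :
    PySem.Chars.strip (p1 ++ ([' '] ++ (p2 ++ ([' '] ++ (p3 ++ ([' '] ++ (p4 ++ [' ']))))))) =
      p1 ++ ([' '] ++ (p2 ++ ([' '] ++ (p3 ++ ([' '] ++ p4))))) := by
  simp only [← List.append_assoc]
  obtain ⟨c, t, rfl⟩ : ∃ c t, p1 = c :: t := by
    cases p1 with
    | nil => exact absurd rfl h1
    | cons c t => exact ⟨c, t, rfl⟩
  obtain ⟨d, r, hr⟩ : ∃ d r, p4.reverse = d :: r := by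
    cases hh : p4.reverse with
    | nil => exact absurd (by simpa using hh) h4
    | cons d r => exact ⟨d, r, rfl⟩
  have hd : d ∈ p4 := by rw [← List.mem_reverse, hr]; exact List.mem_cons_self
  have hlstrip : PySem.Chars.lstrip
      (c :: t ++ [' '] ++ p2 ++ [' '] ++ p3 ++ [' '] ++ p4 ++ [' ']) =
      c :: t ++ [' '] ++ p2 ++ [' '] ++ p3 ++ [' '] ++ p4 ++ [' '] := by
    simp [PySem.Chars.lstrip, n1 c List.mem_cons_self]
  unfold PySem.Chars.strip
  rw [hlstrip]
  unfold PySem.Chars.rstrip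
  simp only [List.reverse_append, List.reverse_cons, List.reverse_nil, List.nil_append,
    List.append_assoc, List.cons_append, List.dropWhile_cons]
  rw [hr]
  simp only [show PySem.Chars.isspace ' ' = true from rfl, if_true, List.cons_append,
    List.dropWhile_cons, n4 d hd]
  have hp4 : r.reverse ++ [d] = p4 := by
    have h' := congrArg List.reverse hr
    simpa using h'.symm
  simp [List.append_assoc, hp4]

-- ===== VERDICT (by name: the statement is the Claim_ definition above) =====
theorem bridge_hand_shorthand_spec : Claim_equal_bridge_hand_shorthand := by
  intro hand _
  unfold Spec_bridge_hand_shorthand bridge_hand_shorthand bridge_hand_shorthand_alt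
  simp only [List.foldl, List.map, List.nil_append]
  rw [pvPiece_eq, pvPiece_eq, pvPiece_eq, pvPiece_eq]
  rw [PySem.Chars.join_cons_cons, PySem.Chars.join_cons_cons, PySem.Chars.join_cons_cons,
    PySem.Chars.join_singleton]
  congr 1
  simp only [List.append_assoc]
  rw [pvStrip_pieces _ _ _ _ (pvPieceB_ne_nil _) (pvPieceB_ne_nil _)
    (pvPieceB_nonspace _) (pvPieceB_nonspace _)]
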